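-- pv_equiv track=rewrite | github.com/joshrobertson8/leetcode26 | array/easy/3934-coupon-code-validator/2025-07-11 14.06.42 - Accepted - runtime 13ms - memory 12.5MB.py | validateCoupons
-- ===== SOURCE A (Python) =====
-- def validateCoupons(code, businessLine, isActive):
--     """
--     :type code: List[str]
--     :type businessLine: List[str]
--     :type isActive: List[bool]
--     :rtype: List[str]
--     """
--     order = {"electronics": 0, "grocery": 1, "pharmacy": 2, "restaurant": 3}
--     result = []
--
--     for c, b, a in zip(code, businessLine, isActive):
--         if not c or b not in order or not a:
--             continue
--
--         if all(ch.isalnum() or ch == "_" for ch in c):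
--             result.append((order[b], c))
--
--     result.sort()
--     return [c for _, c in result]
-- ===== SOURCE B (Python) =====
-- def _valid(c, a):
--     return bool(a) and bool(c) and all(ch.isalnum() or ch == "_" for ch in c)
--
--
-- def validateCoupons(code, businessLine, isActive):
--     e, g, p, r = [], [], [], []
--     for c, b, a in zip(code, businessLine, isActive):
--         if not _valid(c, a):
--             continue
--         if b == "electronics":
--             e.append(c)
--         elif b == "grocery":
--             g.append(c)
--         elif b == "pharmacy":
--             p.append(c)
--         elif b == "restaurant":
--             r.append(c)
--     return sorted(e) + sorted(g) + sorted(p) + sorted(r)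
-- ===== Notes on version B (the rewrite author's own statement) =====
-- stated objective: alternative
-- what changed: B replaces A's decorate-sort-undecorate (build (rank, code) tuples, one global tuple sort, strip ranks) by four per-category buckets filled in one pass and concatenated after sorting each bucket lexicographically in the fixed category order.
import Mathlib
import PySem

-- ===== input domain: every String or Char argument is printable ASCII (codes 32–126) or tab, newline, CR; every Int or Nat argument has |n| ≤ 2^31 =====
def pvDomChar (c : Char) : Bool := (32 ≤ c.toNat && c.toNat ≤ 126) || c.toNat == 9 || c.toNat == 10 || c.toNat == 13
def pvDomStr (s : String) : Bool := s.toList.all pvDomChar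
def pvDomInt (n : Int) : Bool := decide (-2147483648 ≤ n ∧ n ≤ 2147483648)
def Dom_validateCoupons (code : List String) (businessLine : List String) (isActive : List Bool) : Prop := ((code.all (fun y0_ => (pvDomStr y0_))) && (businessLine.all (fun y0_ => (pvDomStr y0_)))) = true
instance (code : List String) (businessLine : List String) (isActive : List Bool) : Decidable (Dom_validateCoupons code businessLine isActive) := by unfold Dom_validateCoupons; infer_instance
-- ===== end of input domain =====

-- B buckets valid codes per business line in one pass and concatenates the per-bucket string sorts
-- in fixed category order, instead of A's global sort of (rank, code) tuples (objective: alternative).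


-- ===== PORT A =====
-- literal port of A: collect (order[b], c) tuples over zip(code, businessLine, isActive),
-- result.sort() on tuples = sorted2 by (fst, snd), then strip the rank.
-- order[b] is ported as getD _ 0: the lookup is guarded by the membership test, so no KeyError arises.
def validateCoupons (code : List String) (businessLine : List String) (isActive : List Bool) : List String :=
  let order : PySem.Dict String Int :=
    PySem.Dict.ofList [("electronics", 0), ("grocery", 1), ("pharmacy", 2), ("restaurant", 3)]
  let result : List (Int × String) :=
    (code.zip (businessLine.zip isActive)).foldl
      (fun result t =>
        if t.1 = "" ∨ order.contains t.2.1 = false ∨ t.2.2 = false then result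
        else if t.1.toList.all (fun ch => PySem.Chars.isalnum ch || ch == '_') then
          result ++ [(order.getD t.2.1 0, t.1)]
        else result)
      []
  (PySem.List.sorted2 result (fun x => x.1) (fun x => x.2)).map (fun x => x.2)

-- ===== PORT B =====
-- port of Source B's helper _valid
def pvValid (c : String) (a : Bool) : Bool :=
  a && !(c == "") && c.toList.all (fun ch => PySem.Chars.isalnum ch || ch == '_')

-- literal port of B: one pass filling four buckets, then sorted(e)+sorted(g)+sorted(p)+sorted(r)
def validateCoupons_alt (code : List String) (businessLine : List String) (isActive : List Bool) : List String :=
  let st : List String × List String × List String × List String :=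
    (code.zip (businessLine.zip isActive)).foldl
      (fun st t =>
        if !(pvValid t.1 t.2.2) then st
        else if t.2.1 = "electronics" then (st.1 ++ [t.1], st.2.1, st.2.2.1, st.2.2.2)
        else if t.2.1 = "grocery" then (st.1, st.2.1 ++ [t.1], st.2.2.1, st.2.2.2)
        else if t.2.1 = "pharmacy" then (st.1, st.2.1, st.2.2.1 ++ [t.1], st.2.2.2)
        else if t.2.1 = "restaurant" then (st.1, st.2.1, st.2.2.1, st.2.2.2 ++ [t.1])
        else st)
      ([], [], [], [])
  PySem.List.sorted st.1 (fun x => x) ++ PySem.List.sorted st.2.1 (fun x => x)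
    ++ PySem.List.sorted st.2.2.1 (fun x => x) ++ PySem.List.sorted st.2.2.2 (fun x => x)

-- ===== PRECONDITION & SPEC =====
def Spec_validateCoupons (code : List String) (businessLine : List String) (isActive : List Bool) (out : List String) : Prop := out = validateCoupons_alt code businessLine isActive
instance (code : List String) (businessLine : List String) (isActive : List Bool) (out : List String) : Decidable (Spec_validateCoupons code businessLine isActive out) := by unfold Spec_validateCoupons; infer_instance

-- ===== CLAIM (what is proved, stated in full; the proofs are below) =====
def Claim_equal_validateCoupons : Prop := ∀ (code : List String) (businessLine : List String) (isActive : List Bool), Dom_validateCoupons code businessLine isActive → Spec_validateCoupons code businessLine isActive (validateCoupons code businessLine isActive)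

-- ===== LEMMAS AND PROOFS =====

def pvKeyOf (b : String) : Int :=
  if b = "electronics" then 0 else if b = "grocery" then 1 else if b = "pharmacy" then 2 else 3
def pvInOrd (b : String) : Bool :=
  b == "electronics" || b == "grocery" || b == "pharmacy" || b == "restaurant"

lemma pvOrder_mk :
    (PySem.Dict.ofList [("electronics", (0:Int)), ("grocery", 1), ("pharmacy", 2), ("restaurant", 3)])
      = PySem.Dict.mk [("electronics", (0:Int)), ("grocery", 1), ("pharmacy", 2), ("restaurant", 3)] := by
  decide

lemma pvOrder_contains (b : String) :
    (PySem.Dict.ofList [("electronics", (0:Int)), ("grocery", 1), ("pharmacy", 2), ("restaurant", 3)]).contains b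
      = pvInOrd b := by
  rw [pvOrder_mk]
  simp [PySem.Dict.contains_mk, pvInOrd, BEq.comm, Bool.or_assoc]

lemma pvOrder_getD (b : String) (h : pvInOrd b = true) :
    (PySem.Dict.ofList [("electronics", (0:Int)), ("grocery", 1), ("pharmacy", 2), ("restaurant", 3)]).getD b 0
      = pvKeyOf b := by
  rw [pvOrder_mk]
  simp only [pvInOrd, Bool.or_eq_true, beq_iff_eq] at h
  rcases h with ((h | h) | h) | h <;> subst h <;> decide

def pvP (t : String × String × Bool) : Bool := pvValid t.1 t.2.2 && pvInOrd t.2.1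
def pvF (t : String × String × Bool) : Int × String := (pvKeyOf t.2.1, t.1)
def pvBucket (b : String) (ts : List (String × String × Bool)) : List String :=
  (ts.filter (fun t => pvValid t.1 t.2.2 && t.2.1 == b)).map (fun t => t.1)


def pvStepA (result : List (Int × String)) (t : String × String × Bool) : List (Int × String) :=
  if t.1 = "" ∨ (PySem.Dict.ofList [("electronics", (0:Int)), ("grocery", 1), ("pharmacy", 2), ("restaurant", 3)]).contains t.2.1 = false ∨ t.2.2 = false then result
  else if t.1.toList.all (fun ch => PySem.Chars.isalnum ch || ch == '_') then
    result ++ [((PySem.Dict.ofList [("electronics", (0:Int)), ("grocery", 1), ("pharmacy", 2), ("restaurant", 3)]).getD t.2.1 0, t.1)]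
  else result

lemma pvA_list (ts : List (String × String × Bool)) :
    ts.foldl pvStepA [] = (ts.filter pvP).map pvF := by
  have hfun : pvStepA = (fun result t => if pvP t = true then result ++ [pvF t] else result) := by
    funext result t
    rcases t with ⟨c, b, a⟩
    unfold pvStepA
    rw [pvOrder_contains]
    by_cases hc : c = "" <;> by_cases hb : pvInOrd b <;> by_cases ha : a <;>
      by_cases hall : (c.toList.all (fun ch => PySem.Chars.isalnum ch || ch == '_')) = true <;>
      simp [pvP, pvValid, pvF, hc, hb, ha, hall, pvOrder_getD b]
  rw [hfun, PySem.List.foldl_append_if]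
  simp

def pvStepB (st : List String × List String × List String × List String)
    (t : String × String × Bool) : List String × List String × List String × List String :=
  if !(pvValid t.1 t.2.2) then st
  else if t.2.1 = "electronics" then (st.1 ++ [t.1], st.2.1, st.2.2.1, st.2.2.2)
  else if t.2.1 = "grocery" then (st.1, st.2.1 ++ [t.1], st.2.2.1, st.2.2.2)
  else if t.2.1 = "pharmacy" then (st.1, st.2.1, st.2.2.1 ++ [t.1], st.2.2.2)
  else if t.2.1 = "restaurant" then (st.1, st.2.1, st.2.2.1, st.2.2.2 ++ [t.1])
  else st

lemma pvB_fold (ts : List (String × String × Bool)) (e g p r : List String) :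
    ts.foldl pvStepB (e, g, p, r)
      = (e ++ pvBucket "electronics" ts, g ++ pvBucket "grocery" ts,
         p ++ pvBucket "pharmacy" ts, r ++ pvBucket "restaurant" ts) := by
  induction ts generalizing e g p r with
  | nil => simp [pvBucket]
  | cons t ts ih =>
    rcases t with ⟨c, b, a⟩
    rw [List.foldl_cons]
    by_cases hv : pvValid c a
    · by_cases h1 : b = "electronics"
      · subst h1
        have hs : pvStepB (e, g, p, r) (c, "electronics", a) = (e ++ [c], g, p, r) := by
          simp [pvStepB, hv]
        rw [hs, ih]; simp [pvBucket, hv]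
      · by_cases h2 : b = "grocery"
        · subst h2
          have hs : pvStepB (e, g, p, r) (c, "grocery", a) = (e, g ++ [c], p, r) := by
            simp [pvStepB, hv]
          rw [hs, ih]; simp [pvBucket, hv]
        · by_cases h3 : b = "pharmacy"
          · subst h3
            have hs : pvStepB (e, g, p, r) (c, "pharmacy", a) = (e, g, p ++ [c], r) := by
              simp [pvStepB, hv]
            rw [hs, ih]; simp [pvBucket, hv]
          · by_cases h4 : b = "restaurant"
            · subst h4
              have hs : pvStepB (e, g, p, r) (c, "restaurant", a) = (e, g, p, r ++ [c]) := by
                simp [pvStepB, hv]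
              rw [hs, ih]; simp [pvBucket, hv]
            · have hs : pvStepB (e, g, p, r) (c, b, a) = (e, g, p, r) := by
                simp [pvStepB, hv, h1, h2, h3, h4]
              rw [hs, ih]; simp [pvBucket, h1, h2, h3, h4]
    · have hs : pvStepB (e, g, p, r) (c, b, a) = (e, g, p, r) := by
        simp [pvStepB, hv]
      rw [hs, ih]
      simp [pvBucket, hv]

lemma pvSorted2_eq_sorted_lex (L : List (Int × String)) :
    PySem.List.sorted2 L (fun x => x.1) (fun x => x.2)
      = PySem.List.sorted L (fun x => toLex x) := by
  have hlt : (fun (a b : Int × String) => decide (a.1 < b.1) || (!decide (b.1 < a.1) && decide (a.2 < b.2)))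
      = (fun (a b : Int × String) => decide (toLex a < toLex b)) := by
    funext a b
    rcases lt_trichotomy a.1 b.1 with h | h | h
    · simp [h, Prod.Lex.toLex_lt_toLex, not_lt_of_gt h]
    · simp [h, Prod.Lex.toLex_lt_toLex]
    · simp [h, Prod.Lex.toLex_lt_toLex, not_lt_of_gt h, ne_of_gt h]
  show List.foldl
      (fun acc x => PySem.List.insertBy (fun a b => decide (a.1 < b.1) || (!decide (b.1 < a.1) && decide (a.2 < b.2))) x acc) [] L
    = List.foldl (fun acc x => PySem.List.insertBy (fun a b => decide (toLex a < toLex b)) x acc) [] L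
  rw [hlt]

lemma pvKey_cases (c b : String) (a : Bool) (h : pvP (c, b, a) = true) :
    (b = "electronics" ∧ pvKeyOf b = 0) ∨ (b = "grocery" ∧ pvKeyOf b = 1)
      ∨ (b = "pharmacy" ∧ pvKeyOf b = 2) ∨ (b = "restaurant" ∧ pvKeyOf b = 3) := by
  simp only [pvP, pvInOrd, Bool.and_eq_true, Bool.or_eq_true, beq_iff_eq] at h
  rcases h.2 with ((h | h) | h) | h <;> subst h <;> simp [pvKeyOf]

lemma pvBucket_cons_pos (bk c b' : String) (a : Bool) (ts : List (String × String × Bool))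
    (h : (pvValid c a && (b' == bk)) = true) :
    pvBucket bk ((c, b', a) :: ts) = c :: pvBucket bk ts := by
  simp [pvBucket, h]

lemma pvBucket_cons_neg (bk c b' : String) (a : Bool) (ts : List (String × String × Bool))
    (h : (pvValid c a && (b' == bk)) = false) :
    pvBucket bk ((c, b', a) :: ts) = pvBucket bk ts := by
  simp [pvBucket, h]

lemma pvPerm (ts : List (String × String × Bool)) :
    ((ts.filter pvP).map pvF).Perm
      ((pvBucket "electronics" ts).map (fun c => ((0:Int), c))
        ++ (pvBucket "grocery" ts).map (fun c => ((1:Int), c))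
        ++ (pvBucket "pharmacy" ts).map (fun c => ((2:Int), c))
        ++ (pvBucket "restaurant" ts).map (fun c => ((3:Int), c))) := by
  induction ts with
  | nil => simp [pvBucket]
  | cons t ts ih =>
    rcases t with ⟨c, b, a⟩
    by_cases hp : pvP (c, b, a) = true
    · have hv : pvValid c a = true := by
        have h := hp; simp only [pvP, Bool.and_eq_true] at h; exact h.1
      have hL : List.filter pvP ((c, b, a) :: ts) = (c, b, a) :: List.filter pvP ts := by
        simp [hp]
      rcases pvKey_cases c b a hp with ⟨hb, hk⟩ | ⟨hb, hk⟩ | ⟨hb, hk⟩ | ⟨hb, hk⟩ <;> subst hb <;>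
        rw [hL, List.map_cons]
      · rw [pvBucket_cons_pos _ _ _ _ _ (by simp [hv]),
          pvBucket_cons_neg _ _ _ _ _ (by simp), pvBucket_cons_neg _ _ _ _ _ (by simp),
          pvBucket_cons_neg _ _ _ _ _ (by simp), List.map_cons]
        have hF : pvF (c, "electronics", a) = ((0:Int), c) := by simp [pvF, pvKeyOf]
        rw [hF]
        exact ih.cons _
      · rw [pvBucket_cons_neg _ _ _ _ _ (by simp), pvBucket_cons_pos _ _ _ _ _ (by simp [hv]),
          pvBucket_cons_neg _ _ _ _ _ (by simp), pvBucket_cons_neg _ _ _ _ _ (by simp),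
          List.map_cons]
        have hF : pvF (c, "grocery", a) = ((1:Int), c) := by simp [pvF, pvKeyOf]
        rw [hF]
        have ih' := ih; simp only [List.append_assoc] at ih'
        simp only [List.append_assoc]
        exact (ih'.cons _).trans List.perm_middle.symm
      · rw [pvBucket_cons_neg _ _ _ _ _ (by simp), pvBucket_cons_neg _ _ _ _ _ (by simp),
          pvBucket_cons_pos _ _ _ _ _ (by simp [hv]), pvBucket_cons_neg _ _ _ _ _ (by simp),
          List.map_cons]
        have hF : pvF (c, "pharmacy", a) = ((2:Int), c) := by simp [pvF, pvKeyOf]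
        rw [hF]
        have ih' := ih; simp only [List.append_assoc] at ih'
        simp only [List.append_assoc]
        exact (ih'.cons _).trans
          (List.perm_middle.symm.trans (List.Perm.append_left _ List.perm_middle.symm))
      · rw [pvBucket_cons_neg _ _ _ _ _ (by simp), pvBucket_cons_neg _ _ _ _ _ (by simp),
          pvBucket_cons_neg _ _ _ _ _ (by simp), pvBucket_cons_pos _ _ _ _ _ (by simp [hv]),
          List.map_cons]
        have hF : pvF (c, "restaurant", a) = ((3:Int), c) := by simp [pvF, pvKeyOf]
        rw [hF]
        have ih' := ih; simp only [List.append_assoc] at ih'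
        simp only [List.append_assoc]
        exact (ih'.cons _).trans
          (List.perm_middle.symm.trans (List.Perm.append_left _
            (List.perm_middle.symm.trans (List.Perm.append_left _ List.perm_middle.symm))))
    · have hv : ∀ bk : String, pvInOrd bk = true → (pvValid c a && (b == bk)) = false := by
        intro bk hbk
        by_cases h : pvValid c a
        · simp only [pvP, h, Bool.true_and] at hp
          simp only [h, Bool.true_and]
          by_cases he : b = bk
          · subst he; exact absurd (by simp [pvInOrd] at hbk ⊢; tauto) hp
          · simp [he]
        · simp [Bool.eq_false_iff.mpr h]
      have hL : List.filter pvP ((c, b, a) :: ts) = List.filter pvP ts := by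
        simp [hp]
      rw [hL, pvBucket_cons_neg _ _ _ _ _ (hv _ (by decide)),
        pvBucket_cons_neg _ _ _ _ _ (hv _ (by decide)),
        pvBucket_cons_neg _ _ _ _ _ (hv _ (by decide)),
        pvBucket_cons_neg _ _ _ _ _ (hv _ (by decide))]
      exact ih

lemma pvSeg_pairwise (k : Int) (l : List String) :
    ((PySem.List.sorted l (fun x => x)).map (fun c => (k, c))).Pairwise
      (fun a b : Int × String => toLex a ≤ toLex b) := by
  rw [List.pairwise_map]
  refine (PySem.List.sorted_pairwise l (fun x => x)).imp ?_
  intro a b h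
  exact Prod.Lex.toLex_le_toLex.mpr (Or.inr ⟨rfl, h⟩)

lemma pvSeg_fst (k : Int) (l : List String) (x : Int × String)
    (hx : x ∈ (PySem.List.sorted l (fun c => c)).map (fun c => (k, c))) : x.1 = k := by
  rcases List.mem_map.mp hx with ⟨c, _, rfl⟩
  rfl

lemma pvPairwise (e g p r : List String) :
    ((PySem.List.sorted e (fun x => x)).map (fun c => ((0:Int), c))
      ++ (PySem.List.sorted g (fun x => x)).map (fun c => ((1:Int), c))
      ++ (PySem.List.sorted p (fun x => x)).map (fun c => ((2:Int), c))
      ++ (PySem.List.sorted r (fun x => x)).map (fun c => ((3:Int), c))).Pairwise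
      (fun a b => toLex a ≤ toLex b) := by
  have hle : ∀ (k k' : Int), k < k' → ∀ (x y : Int × String), x.1 = k → y.1 = k' →
      toLex x ≤ toLex y := by
    intro k k' hkk x y hx hy
    exact le_of_lt (Prod.Lex.toLex_lt_toLex.mpr (Or.inl (by rw [hx, hy]; exact hkk)))
  simp only [List.append_assoc]
  refine List.pairwise_append.mpr ⟨pvSeg_pairwise 0 e, ?_, ?_⟩
  · refine List.pairwise_append.mpr ⟨pvSeg_pairwise 1 g, ?_, ?_⟩
    · refine List.pairwise_append.mpr ⟨pvSeg_pairwise 2 p, pvSeg_pairwise 3 r, ?_⟩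
      · intro x hx y hy
        exact hle 2 3 (by norm_num) x y (pvSeg_fst 2 p x hx) (pvSeg_fst 3 r y hy)
    · intro x hx y hy
      rcases List.mem_append.mp hy with h | h
      · exact hle 1 2 (by norm_num) x y (pvSeg_fst 1 g x hx) (pvSeg_fst 2 p y h)
      · exact hle 1 3 (by norm_num) x y (pvSeg_fst 1 g x hx) (pvSeg_fst 3 r y h)
  · intro x hx y hy
    rcases List.mem_append.mp hy with h | h
    · exact hle 0 1 (by norm_num) x y (pvSeg_fst 0 e x hx) (pvSeg_fst 1 g y h)
    rcases List.mem_append.mp h with h | h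
    · exact hle 0 2 (by norm_num) x y (pvSeg_fst 0 e x hx) (pvSeg_fst 2 p y h)
    · exact hle 0 3 (by norm_num) x y (pvSeg_fst 0 e x hx) (pvSeg_fst 3 r y h)

lemma pvMain (code bl : List String) (ia : List Bool) :
    (PySem.List.sorted2
        ((code.zip (bl.zip ia)).foldl pvStepA [])
        (fun x => x.1) (fun x => x.2)).map (fun x => x.2)
      = (fun st : List String × List String × List String × List String =>
          PySem.List.sorted st.1 (fun x => x) ++ PySem.List.sorted st.2.1 (fun x => x)
            ++ PySem.List.sorted st.2.2.1 (fun x => x) ++ PySem.List.sorted st.2.2.2 (fun x => x))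
          ((code.zip (bl.zip ia)).foldl pvStepB ([], [], [], [])) := by
  set ts := code.zip (bl.zip ia) with hts
  rw [pvA_list, pvSorted2_eq_sorted_lex, pvB_fold]
  simp only [List.nil_append]
  have hinj : Function.Injective (fun x : Int × String => toLex x) := fun a b h => h
  have hperm : (PySem.List.sorted ((ts.filter pvP).map pvF) (fun x => toLex x)).Perm
      ((PySem.List.sorted (pvBucket "electronics" ts) (fun x => x)).map (fun c => ((0:Int), c))
        ++ (PySem.List.sorted (pvBucket "grocery" ts) (fun x => x)).map (fun c => ((1:Int), c))
        ++ (PySem.List.sorted (pvBucket "pharmacy" ts) (fun x => x)).map (fun c => ((2:Int), c))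
        ++ (PySem.List.sorted (pvBucket "restaurant" ts) (fun x => x)).map (fun c => ((3:Int), c))) := by
    refine (PySem.List.sorted_perm _ _ _).trans ((pvPerm ts).trans ?_)
    have p0 := (PySem.List.sorted_perm (pvBucket "electronics" ts) (fun x : String => x) false).symm.map (fun c => ((0:Int), c))
    have p1 := (PySem.List.sorted_perm (pvBucket "grocery" ts) (fun x : String => x) false).symm.map (fun c => ((1:Int), c))
    have p2 := (PySem.List.sorted_perm (pvBucket "pharmacy" ts) (fun x : String => x) false).symm.map (fun c => ((2:Int), c))
    have p3 := (PySem.List.sorted_perm (pvBucket "restaurant" ts) (fun x : String => x) false).symm.map (fun c => ((3:Int), c))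
    exact ((p0.append p1).append p2).append p3
  rw [PySem.List.eq_of_perm_of_pairwise_le_of_injective (fun x : Int × String => toLex x)
    hinj hperm (PySem.List.sorted_pairwise _ _)
    (pvPairwise (pvBucket "electronics" ts) (pvBucket "grocery" ts)
      (pvBucket "pharmacy" ts) (pvBucket "restaurant" ts))]
  simp [List.map_append, List.map_map]

-- ===== VERDICT (by name: the statement is the Claim_ definition above) =====
theorem validateCoupons_spec : Claim_equal_validateCoupons := by
  intro code businessLine isActive _
  show validateCoupons code businessLine isActive = validateCoupons_alt code businessLine isActive
  exact pvMain code businessLine isActive
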